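-- pv_equiv track=rewrite | github.com/maxawake/Bomberman-Reinforcement-Learning | Code/agent_code/deep_agent/callbacks.py | get_danger_zone_reloaded
-- ===== SOURCE A (Python) =====
-- def get_danger_zone_reloaded(bombs, position):
--     """
--     gives the featback if the players state is a state of danger,
--      and if where the danger (bomb) is relative to player, or not (range of bomb or not)
--     Inputs:
--         state: game_state, get_relative_bomb(game_state)
--     Returns:
--     index_danger_zone in update
--     """
--     if len(bombs) == 0:
--         # no bombs laid yet
--         return 0
--     else:
--         danger_zone = []
--         for bomb in bombs:
--             if bomb[1] % 2 == 0:
--                 for i in range(-3, 4):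
--                     danger_zone.append([bomb[0], bomb[1]+i])
--             elif bomb[0] % 2 == 0:
--                 for i in range(-3, 4):
--                     danger_zone.append([bomb[0]+i, bomb[1]])
--             else:
--                 for i in range(-3, 4):
--                     danger_zone.append([bomb[0]+i, bomb[1]])
--                     danger_zone.append([bomb[0], bomb[1]+i])
--
--         if list(position) in danger_zone:
--             return 1
--         else:
--             return 0
-- ===== SOURCE B (Python) =====
-- def get_danger_zone_reloaded(bombs, position):
--     x, y = position
--     for bx, by in bombs:
--         on_col = x == bx and abs(y - by) <= 3
--         on_row = y == by and abs(x - bx) <= 3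
--         if by % 2 == 0:
--             hit = on_col
--         elif bx % 2 == 0:
--             hit = on_row
--         else:
--             hit = on_row or on_col
--         if hit:
--             return 1
--     return 0
-- ===== Notes on version B (the rewrite author's own statement) =====
-- stated objective: simpler
-- what changed: B drops A's materialised 14-entries-per-bomb danger_zone list and its final membership scan, instead testing the position against each bomb's blast lines directly with parity-guarded arithmetic (equality on one axis, |delta|<=3 on the other), returning 1 on the first match.
import Mathlib
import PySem

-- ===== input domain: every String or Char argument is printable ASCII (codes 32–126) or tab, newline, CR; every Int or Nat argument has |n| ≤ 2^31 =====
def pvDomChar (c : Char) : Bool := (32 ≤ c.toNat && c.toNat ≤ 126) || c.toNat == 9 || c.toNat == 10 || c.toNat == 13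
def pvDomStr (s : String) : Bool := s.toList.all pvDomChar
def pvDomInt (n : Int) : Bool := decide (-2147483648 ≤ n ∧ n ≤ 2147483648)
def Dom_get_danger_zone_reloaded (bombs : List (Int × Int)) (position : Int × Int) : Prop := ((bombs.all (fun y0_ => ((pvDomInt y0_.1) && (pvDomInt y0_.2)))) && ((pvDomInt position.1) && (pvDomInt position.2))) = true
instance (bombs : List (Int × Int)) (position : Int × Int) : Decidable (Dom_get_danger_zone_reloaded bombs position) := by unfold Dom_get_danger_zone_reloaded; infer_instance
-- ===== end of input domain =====

-- B replaces A's materialised danger_zone list and membership scan by a per-bomb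
-- arithmetic test of the position against the bomb's blast lines (objective: simpler).

-- ===== PORT A =====
def get_danger_zone_reloaded (bombs : List (Int × Int)) (position : Int × Int) : Int :=
  if bombs.length = 0 then 0
  else
    let danger_zone : List (Int × Int) :=
      bombs.foldl (fun dz bomb =>
        if PySem.Int.mod bomb.2 2 = 0 then
          (PySem.List.pyRange (-3) 4 1).foldl (fun dz i => dz ++ [(bomb.1, bomb.2 + i)]) dz
        else if PySem.Int.mod bomb.1 2 = 0 then
          (PySem.List.pyRange (-3) 4 1).foldl (fun dz i => dz ++ [(bomb.1 + i, bomb.2)]) dz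
        else
          (PySem.List.pyRange (-3) 4 1).foldl
            (fun dz i => dz ++ [(bomb.1 + i, bomb.2), (bomb.1, bomb.2 + i)]) dz) []
    if position ∈ danger_zone then 1 else 0

-- ===== PORT B =====
def pvAltLoop (position : Int × Int) : List (Int × Int) → Int
  | [] => 0
  | b :: rest =>
    let on_col := decide (position.1 = b.1 ∧ |position.2 - b.2| ≤ 3)
    let on_row := decide (position.2 = b.2 ∧ |position.1 - b.1| ≤ 3)
    let hit := if PySem.Int.mod b.2 2 = 0 then on_col
               else if PySem.Int.mod b.1 2 = 0 then on_row
               else on_row || on_col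
    if hit then 1 else pvAltLoop position rest

def get_danger_zone_reloaded_alt (bombs : List (Int × Int)) (position : Int × Int) : Int :=
  pvAltLoop position bombs

-- ===== PRECONDITION & SPEC =====
def Spec_get_danger_zone_reloaded (bombs : List (Int × Int)) (position : Int × Int) (out : Int) : Prop := out = get_danger_zone_reloaded_alt bombs position
instance (bombs : List (Int × Int)) (position : Int × Int) (out : Int) : Decidable (Spec_get_danger_zone_reloaded bombs position out) := by unfold Spec_get_danger_zone_reloaded; infer_instance

-- ===== CLAIM (what is proved, stated in full; the proofs are below) =====
def Claim_equal_get_danger_zone_reloaded : Prop := ∀ (bombs : List (Int × Int)) (position : Int × Int), Dom_get_danger_zone_reloaded bombs position → Spec_get_danger_zone_reloaded bombs position (get_danger_zone_reloaded bombs position)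

-- ===== LEMMAS AND PROOFS =====

-- the danger cells one bomb contributes in A (proof-side characterisation)
def pvZone (b : Int × Int) : List (Int × Int) :=
  if PySem.Int.mod b.2 2 = 0 then
    (PySem.List.pyRange (-3) 4 1).map (fun i => (b.1, b.2 + i))
  else if PySem.Int.mod b.1 2 = 0 then
    (PySem.List.pyRange (-3) 4 1).map (fun i => (b.1 + i, b.2))
  else
    (PySem.List.pyRange (-3) 4 1).flatMap (fun i => [(b.1 + i, b.2), (b.1, b.2 + i)])

theorem pvRng : PySem.List.pyRange (-3 : Int) 4 1 = [-3, -2, -1, 0, 1, 2, 3] := by decide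

-- A's per-bomb foldl step appends exactly pvZone
theorem pvStep (dz : List (Int × Int)) (b : Int × Int) :
    (if PySem.Int.mod b.2 2 = 0 then
        (PySem.List.pyRange (-3) 4 1).foldl (fun dz i => dz ++ [(b.1, b.2 + i)]) dz
      else if PySem.Int.mod b.1 2 = 0 then
        (PySem.List.pyRange (-3) 4 1).foldl (fun dz i => dz ++ [(b.1 + i, b.2)]) dz
      else
        (PySem.List.pyRange (-3) 4 1).foldl
          (fun dz i => dz ++ [(b.1 + i, b.2), (b.1, b.2 + i)]) dz)
    = dz ++ pvZone b := by
  unfold pvZone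
  rw [pvRng]
  split_ifs <;> simp [List.foldl]

-- membership in A's accumulated danger_zone
theorem pvMemFold (bombs : List (Int × Int)) (dz : List (Int × Int)) (p : Int × Int) :
    (p ∈ bombs.foldl (fun dz bomb =>
        if PySem.Int.mod bomb.2 2 = 0 then
          (PySem.List.pyRange (-3) 4 1).foldl (fun dz i => dz ++ [(bomb.1, bomb.2 + i)]) dz
        else if PySem.Int.mod bomb.1 2 = 0 then
          (PySem.List.pyRange (-3) 4 1).foldl (fun dz i => dz ++ [(bomb.1 + i, bomb.2)]) dz
        else
          (PySem.List.pyRange (-3) 4 1).foldl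
            (fun dz i => dz ++ [(bomb.1 + i, bomb.2), (bomb.1, bomb.2 + i)]) dz) dz)
    ↔ p ∈ dz ∨ ∃ b ∈ bombs, p ∈ pvZone b := by
  have h : (fun (dz : List (Int × Int)) (bomb : Int × Int) =>
        if PySem.Int.mod bomb.2 2 = 0 then
          (PySem.List.pyRange (-3) 4 1).foldl (fun dz i => dz ++ [(bomb.1, bomb.2 + i)]) dz
        else if PySem.Int.mod bomb.1 2 = 0 then
          (PySem.List.pyRange (-3) 4 1).foldl (fun dz i => dz ++ [(bomb.1 + i, bomb.2)]) dz
        else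
          (PySem.List.pyRange (-3) 4 1).foldl
            (fun dz i => dz ++ [(bomb.1 + i, bomb.2), (bomb.1, bomb.2 + i)]) dz)
      = fun dz bomb => dz ++ pvZone bomb := by
    funext dz bomb; exact pvStep dz bomb
  rw [h, PySem.List.foldl_append_eq_flatMap]
  simp [List.mem_flatMap]

-- membership in one vertical / horizontal blast line
theorem pvMemCol (p : Int × Int) (x y : Int) :
    p ∈ ([-3, -2, -1, 0, 1, 2, 3] : List Int).map (fun i => (x, y + i))
      ↔ p.1 = x ∧ |p.2 - y| ≤ 3 := by
  obtain ⟨p1, p2⟩ := p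
  simp only [List.map_cons, List.map_nil, List.mem_cons, List.not_mem_nil, or_false,
    Prod.mk.injEq, abs_le]
  omega

theorem pvMemRow (p : Int × Int) (x y : Int) :
    p ∈ ([-3, -2, -1, 0, 1, 2, 3] : List Int).map (fun i => (x + i, y))
      ↔ p.2 = y ∧ |p.1 - x| ≤ 3 := by
  obtain ⟨p1, p2⟩ := p
  simp only [List.map_cons, List.map_nil, List.mem_cons, List.not_mem_nil, or_false,
    Prod.mk.injEq, abs_le]
  omega

-- the interleaved flatMap of A's else-branch is the union of the two lines
theorem pvMemBoth (p : Int × Int) (x y : Int) (l : List Int) :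
    p ∈ l.flatMap (fun i => [(x + i, y), (x, y + i)])
      ↔ p ∈ l.map (fun i => (x + i, y)) ∨ p ∈ l.map (fun i => (x, y + i)) := by
  simp only [List.mem_flatMap, List.mem_map, List.mem_cons, List.not_mem_nil, or_false]
  constructor
  · rintro ⟨i, hi, (rfl | rfl)⟩
    · exact Or.inl ⟨i, hi, rfl⟩
    · exact Or.inr ⟨i, hi, rfl⟩
  · rintro (⟨i, hi, rfl⟩ | ⟨i, hi, rfl⟩)
    · exact ⟨i, hi, Or.inl rfl⟩
    · exact ⟨i, hi, Or.inr rfl⟩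

-- B's per-bomb hit test is membership in pvZone
theorem pvHitIff (p b : Int × Int) :
    ((if PySem.Int.mod b.2 2 = 0 then decide (p.1 = b.1 ∧ |p.2 - b.2| ≤ 3)
      else if PySem.Int.mod b.1 2 = 0 then decide (p.2 = b.2 ∧ |p.1 - b.1| ≤ 3)
      else decide (p.2 = b.2 ∧ |p.1 - b.1| ≤ 3) || decide (p.1 = b.1 ∧ |p.2 - b.2| ≤ 3)) = true)
    ↔ p ∈ pvZone b := by
  unfold pvZone
  rw [pvRng]
  split_ifs
  · rw [decide_eq_true_eq, pvMemCol]
  · rw [decide_eq_true_eq, pvMemRow]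
  · rw [Bool.or_eq_true, decide_eq_true_eq, decide_eq_true_eq, pvMemBoth, pvMemRow, pvMemCol]

-- B's loop decides existence of a matching bomb
theorem pvAltLoopIff (p : Int × Int) (bombs : List (Int × Int)) :
    pvAltLoop p bombs = if ∃ b ∈ bombs, p ∈ pvZone b then 1 else 0 := by
  induction bombs with
  | nil => simp [pvAltLoop]
  | cons b rest ih =>
    simp only [pvAltLoop, ih]
    by_cases hb : p ∈ pvZone b
    · rw [if_pos ((pvHitIff p b).mpr hb),
        if_pos ⟨b, List.mem_cons.mpr (Or.inl rfl), hb⟩]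
    · rw [if_neg (fun hh => hb ((pvHitIff p b).mp hh))]
      congr 1
      simp only [eq_iff_iff, List.mem_cons]
      constructor
      · rintro ⟨c, hc, hp⟩; exact ⟨c, Or.inr hc, hp⟩
      · rintro ⟨c, (rfl | hc), hp⟩
        · exact absurd hp hb
        · exact ⟨c, hc, hp⟩

-- ===== VERDICT (by name: the statement is the Claim_ definition above) =====
theorem get_danger_zone_reloaded_spec : Claim_equal_get_danger_zone_reloaded := by
  intro bombs position _
  unfold Spec_get_danger_zone_reloaded get_danger_zone_reloaded get_danger_zone_reloaded_alt
  rw [pvAltLoopIff]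
  cases bombs with
  | nil => simp
  | cons b rest =>
    simp only [List.length_cons, Nat.succ_ne_zero, if_false]
    congr 1
    simp only [pvMemFold, List.not_mem_nil, false_or]
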